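-- pv_equiv track=rewrite | github.com/Sskr2000us/SAVO | services/api/app/core/orchestration_rules.py | calculate_leftover_reuse_schedule
-- ===== SOURCE A (Python) =====
-- from typing import List, Dict, Any, Set, Optional
--
-- def calculate_leftover_reuse_schedule(
--     plan_days: int,
--     reuse_within_days: int = 2
-- ) -> Dict[int, List[int]]:
--     """
--     Calculate which days can reuse leftovers from which previous days
--     Returns: {day_index: [source_day_indices_that_can_be_reused]}
--     Example: day 2 can reuse from day 0 and 1 if reuse_within_days=2
--     """
--     schedule = {}
--     for day_idx in range(plan_days):
--         reusable_from = []
--         for source_day in range(max(0, day_idx - reuse_within_days), day_idx):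
--             reusable_from.append(source_day)
--         schedule[day_idx] = reusable_from
--     return schedule
-- ===== SOURCE B (Python) =====
-- def calculate_leftover_reuse_schedule(plan_days, reuse_within_days=2):
--     # Scatter instead of gather: each source day pushes itself forward to the
--     # days that may still reuse its leftovers.
--     schedule = {day: [] for day in range(plan_days)}
--     for source_day in range(plan_days):
--         for target in range(source_day + 1, min(plan_days, source_day + reuse_within_days + 1)):
--             schedule[target].append(source_day)
--     return schedule
-- ===== Notes on version B (the rewrite author's own statement) =====
-- stated objective: alternative
-- what changed: Replaces A's gather (each day scans backward over its reusable sources) with a scatter/transpose: every source day pushes its index forward into the schedule entries of the days that can still reuse it, over a pre-seeded dict of empty lists.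
import Mathlib
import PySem

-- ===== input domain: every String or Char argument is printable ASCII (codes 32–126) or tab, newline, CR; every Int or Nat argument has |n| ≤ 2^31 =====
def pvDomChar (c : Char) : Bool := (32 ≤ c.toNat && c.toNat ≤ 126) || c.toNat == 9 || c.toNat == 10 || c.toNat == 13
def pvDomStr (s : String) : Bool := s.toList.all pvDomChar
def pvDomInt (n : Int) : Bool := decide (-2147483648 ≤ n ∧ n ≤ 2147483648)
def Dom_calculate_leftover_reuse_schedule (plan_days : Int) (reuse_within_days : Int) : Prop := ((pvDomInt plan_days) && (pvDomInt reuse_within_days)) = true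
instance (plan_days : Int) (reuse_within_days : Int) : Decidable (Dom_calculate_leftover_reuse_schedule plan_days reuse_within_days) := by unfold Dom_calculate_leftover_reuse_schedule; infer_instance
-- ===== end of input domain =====

-- B replaces A's backward gather per day by a forward scatter from each source day
-- over a pre-seeded dict of empty lists (same cost, different decomposition).

-- ===== PORT A =====
-- A: for each day, scan backward over range(max(0, day - reuse), day) collecting sources.
def calculate_leftover_reuse_schedule (plan_days : Int) (reuse_within_days : Int) : List (Int × List Int) :=
  ((PySem.List.pyRange 0 plan_days 1).foldl
    (fun sched day_idx =>
      sched.insert day_idx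
        ((PySem.List.pyRange (max 0 (day_idx - reuse_within_days)) day_idx 1).foldl
          (fun reusable_from source_day => reusable_from ++ [source_day]) []))
    PySem.Dict.empty).items

-- ===== PORT B =====
-- B: seed every day with [], then each source day appends itself to its forward targets.
def calculate_leftover_reuse_schedule_alt (plan_days : Int) (reuse_within_days : Int) : List (Int × List Int) :=
  (((PySem.List.pyRange 0 plan_days 1).foldl
      (fun sched day => sched.insert day ([] : List Int)) PySem.Dict.empty
    |> fun seed =>
      (PySem.List.pyRange 0 plan_days 1).foldl
        (fun sched source_day =>
          (PySem.List.pyRange (source_day + 1) (min plan_days (source_day + reuse_within_days + 1)) 1).foldl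
            (fun sched target => sched.modify target [] (fun l => l ++ [source_day]))
            sched)
        seed)).items

-- ===== PRECONDITION & SPEC =====
def Spec_calculate_leftover_reuse_schedule (plan_days : Int) (reuse_within_days : Int) (out : List (Int × List Int)) : Prop := out = calculate_leftover_reuse_schedule_alt plan_days reuse_within_days
instance (plan_days : Int) (reuse_within_days : Int) (out : List (Int × List Int)) : Decidable (Spec_calculate_leftover_reuse_schedule plan_days reuse_within_days out) := by unfold Spec_calculate_leftover_reuse_schedule; infer_instance

-- ===== CLAIM (what is proved, stated in full; the proofs are below) =====
def Claim_equal_calculate_leftover_reuse_schedule : Prop := ∀ (plan_days : Int) (reuse_within_days : Int), Dom_calculate_leftover_reuse_schedule plan_days reuse_within_days → Spec_calculate_leftover_reuse_schedule plan_days reuse_within_days (calculate_leftover_reuse_schedule plan_days reuse_within_days)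

-- ===== LEMMAS AND PROOFS =====

-- updating a set with elements it already has is a no-op
theorem pv_set_update_of_subset (s : PySem.Set Int) (xs : List Int)
    (h : ∀ x ∈ xs, x ∈ s) : PySem.Set.update s xs = s := by
  induction xs generalizing s with
  | nil => rfl
  | cons x t ih =>
    have hx : PySem.Set.add s x = s := by
      simp [PySem.Set.add, PySem.Set.contains, h x (by simp)]
    simp only [PySem.Set.update, List.foldl_cons, hx] at *
    exact ih s (fun y hy => h y (by simp [hy]))

-- flatMap of singleton-or-nothing is a filter
theorem pv_flatMap_ite_singleton (l : List Int) (P : Int → Prop) [DecidablePred P] :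
    l.flatMap (fun s => if P s then [s] else []) = l.filter (fun s => decide (P s)) := by
  induction l with
  | nil => rfl
  | cons x t ih => by_cases hx : P x <;> simp [hx, ih]

-- two strictly increasing integer lists with the same members are equal
theorem pv_eq_of_pairwise_lt_of_mem_iff (l₁ l₂ : List Int)
    (h₁ : l₁.Pairwise (· < ·)) (h₂ : l₂.Pairwise (· < ·))
    (h : ∀ x, x ∈ l₁ ↔ x ∈ l₂) : l₁ = l₂ := by
  have n₁ : l₁.Nodup := h₁.imp (fun hlt => ne_of_lt hlt)
  have n₂ : l₂.Nodup := h₂.imp (fun hlt => ne_of_lt hlt)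
  exact List.Perm.eq_of_pairwise
    (fun a b _ _ hab hba => le_antisymm (le_of_lt hab) (le_of_lt hba))
    h₁ h₂ ((List.perm_ext_iff_of_nodup n₁ n₂).mpr h)

-- the sources scattering into day k are exactly A's backward range for day k
theorem pv_filter_sources (p r k : Int) (_hk0 : 0 ≤ k) (hkp : k < p) :
    (PySem.List.pyRange 0 p 1).filter
      (fun s => decide (k ∈ PySem.List.pyRange (s + 1) (min p (s + r + 1)) 1))
      = PySem.List.pyRange (max 0 (k - r)) k 1 := by
  apply pv_eq_of_pairwise_lt_of_mem_iff
  · exact (PySem.List.pairwise_lt_pyRange_one 0 p).sublist List.filter_sublist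
  · exact PySem.List.pairwise_lt_pyRange_one _ _
  · intro x
    simp only [List.mem_filter, PySem.List.mem_pyRange_one, decide_eq_true_eq]
    omega

-- the whole per-key value B accumulates equals A's backward range
theorem pv_scatter_value (p r k : Int) (hk0 : 0 ≤ k) (hkp : k < p) :
    ((PySem.List.pyRange 0 p 1).flatMap
        (fun s => (PySem.List.pyRange (s + 1) (min p (s + r + 1)) 1).map (fun t => (t, s)))
      |>.filter (fun pr => pr.1 == k)).map (fun pr => pr.2)
      = PySem.List.pyRange (max 0 (k - r)) k 1 := by
  rw [List.filter_flatMap, List.map_flatMap]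
  have hstep : ∀ s : Int,
      (((PySem.List.pyRange (s + 1) (min p (s + r + 1)) 1).map (fun t => (t, s))).filter
          (fun pr => pr.1 == k)).map (fun pr => pr.2)
        = if k ∈ PySem.List.pyRange (s + 1) (min p (s + r + 1)) 1 then [s] else [] := by
    intro s
    rw [List.filter_map, List.map_map]
    by_cases hmem : k ∈ PySem.List.pyRange (s + 1) (min p (s + r + 1)) 1
    · have : (PySem.List.pyRange (s + 1) (min p (s + r + 1)) 1).filter
          ((fun pr => pr.1 == k) ∘ (fun t => (t, s))) = [k] := by
        refine pv_eq_of_pairwise_lt_of_mem_iff _ _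
          ((PySem.List.pairwise_lt_pyRange_one _ _).sublist List.filter_sublist)
          (by simp) (fun x => ?_)
        simp only [List.mem_filter, Function.comp, beq_iff_eq, List.mem_singleton]
        constructor
        · rintro ⟨_, rfl⟩; rfl
        · rintro rfl; exact ⟨hmem, rfl⟩
      simp [this, hmem]
    · have : (PySem.List.pyRange (s + 1) (min p (s + r + 1)) 1).filter
          ((fun pr => pr.1 == k) ∘ (fun t => (t, s))) = [] := by
        rw [List.filter_eq_nil_iff]
        intro x hx
        simp only [Function.comp, beq_iff_eq]
        intro hxk; exact hmem (hxk ▸ hx)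
      simp [this, hmem]
  calc ((PySem.List.pyRange 0 p 1).flatMap fun s =>
          (((PySem.List.pyRange (s + 1) (min p (s + r + 1)) 1).map (fun t => (t, s))).filter
            (fun pr => pr.1 == k)).map (fun pr => pr.2))
      = (PySem.List.pyRange 0 p 1).flatMap
          (fun s => if k ∈ PySem.List.pyRange (s + 1) (min p (s + r + 1)) 1 then [s] else []) := by
        exact List.flatMap_congr (fun s _ => hstep s)
    _ = (PySem.List.pyRange 0 p 1).filter
          (fun s => decide (k ∈ PySem.List.pyRange (s + 1) (min p (s + r + 1)) 1)) :=
        pv_flatMap_ite_singleton _ _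
    _ = PySem.List.pyRange (max 0 (k - r)) k 1 := pv_filter_sources p r k hk0 hkp

-- a fresh-key insert loop over distinct days produces exactly the key/value map
theorem pv_items_insert_map (v : Int → List Int) (a b : Int) :
    ((PySem.List.pyRange a b 1).foldl
        (fun sched d => sched.insert d (v d)) PySem.Dict.empty).items
      = (PySem.List.pyRange a b 1).map (fun d => (d, v d)) := by
  have h := PySem.Dict.items_foldl_insert_fresh (PySem.List.pyRange a b 1) (fun d => d) v
    (PySem.Dict.empty : PySem.Dict Int (List Int))
    (fun x _ => PySem.Dict.contains_empty x)
    (by simpa using PySem.List.nodup_pyRange_one a b)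
  simpa using h

-- ===== VERDICT (by name: the statement is the Claim_ definition above) =====
theorem calculate_leftover_reuse_schedule_spec : Claim_equal_calculate_leftover_reuse_schedule := by
  intro p r _
  unfold Spec_calculate_leftover_reuse_schedule
  unfold calculate_leftover_reuse_schedule calculate_leftover_reuse_schedule_alt
  beta_reduce
  -- A's items
  have hA : ((PySem.List.pyRange 0 p 1).foldl
      (fun sched d => sched.insert d
        ((PySem.List.pyRange (max 0 (d - r)) d 1).foldl
          (fun acc s => acc ++ [s]) [])) PySem.Dict.empty).items
      = (PySem.List.pyRange 0 p 1).map
          (fun d => (d, PySem.List.pyRange (max 0 (d - r)) d 1)) := by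
    simp only [PySem.List.foldl_append_singleton_eq_self, List.nil_append]
    exact pv_items_insert_map _ 0 p
  rw [hA]
  -- B: seed
  set seed : PySem.Dict Int (List Int) :=
    (PySem.List.pyRange 0 p 1).foldl (fun sched day => sched.insert day ([] : List Int))
      PySem.Dict.empty with hseed
  have hseedItems : seed.items
      = (PySem.List.pyRange 0 p 1).map (fun d => (d, ([] : List Int))) :=
    pv_items_insert_map (fun _ => []) 0 p
  have hseedKeys : seed.keys = PySem.List.pyRange 0 p 1 := by
    show seed.items.map Prod.fst = _
    rw [hseedItems, List.map_map]; simp [Function.comp_def]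
  -- B: the nested scatter loop as one fold over source-target pairs
  set pairs : List (Int × Int) :=
    (PySem.List.pyRange 0 p 1).flatMap
      (fun s => (PySem.List.pyRange (s + 1) (min p (s + r + 1)) 1).map (fun t => (t, s)))
    with hpairs
  have hBfold : (PySem.List.pyRange 0 p 1).foldl
      (fun sched s =>
        (PySem.List.pyRange (s + 1) (min p (s + r + 1)) 1).foldl
          (fun sched t => sched.modify t [] (fun l => l ++ [s])) sched) seed
      = pairs.foldl (fun sched pr => sched.modify pr.1 [] (fun l => l ++ [pr.2])) seed := by
    rw [hpairs, List.foldl_flatMap]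
    refine PySem.List.foldl_congr_mem _ _ _ _ (fun sched s _ => ?_)
    rw [List.foldl_map]
  rw [hBfold]
  set B : PySem.Dict Int (List Int) :=
    pairs.foldl (fun sched pr => sched.modify pr.1 [] (fun l => l ++ [pr.2])) seed with hB
  -- B's keys are exactly the days
  have hBkeys : B.keys = PySem.List.pyRange 0 p 1 := by
    have hk := PySem.Dict.keys_foldl_modify_key pairs (fun pr : Int × Int => pr.1)
      ([] : List Int) (fun _ pr => fun l => l ++ [pr.2]) seed
    rw [hB, hk, hseedKeys]
    apply pv_set_update_of_subset
    intro x hx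
    rw [List.mem_map] at hx
    obtain ⟨pr, hpr, rfl⟩ := hx
    rw [hpairs, List.mem_flatMap] at hpr
    obtain ⟨s, hs, hpr⟩ := hpr
    rw [List.mem_map] at hpr
    obtain ⟨t, ht, rfl⟩ := hpr
    rw [PySem.List.mem_pyRange_one] at hs ht ⊢
    omega
  have hBnodup : B.keys.Nodup := by
    rw [hBkeys]; exact PySem.List.nodup_pyRange_one 0 p
  -- B's items pointwise
  have hBitems := PySem.Dict.items_eq_map_keys B hBnodup ([] : List Int)
  rw [hBitems, hBkeys]
  apply List.map_congr_left
  intro k hk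
  have hk' := PySem.List.mem_pyRange_one.mp hk
  have hgetD : B.getD k [] = seed.getD k []
      ++ (pairs.filter (fun pr => pr.1 == k)).map (fun pr => pr.2) := by
    rw [hB]; exact PySem.Dict.getD_foldl_modify_append pairs seed k
  have hseedGetD : seed.getD k [] = [] := by
    have hnd : seed.keys.Nodup := by
      rw [hseedKeys]; exact PySem.List.nodup_pyRange_one 0 p
    have hmem : (k, ([] : List Int)) ∈ seed.items := by
      rw [hseedItems]; exact List.mem_map.mpr ⟨k, hk, rfl⟩
    exact PySem.Dict.getD_of_mem_items seed hmem hnd []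
  rw [hgetD, hseedGetD, List.nil_append, hpairs,
    pv_scatter_value p r k hk'.1 hk'.2]
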